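-- pv_equiv track=rewrite | github.com/GTrunSec/nix-pypi-fetcher | scripts/gen_nix_expr.py | find_favorite_archive
-- ===== SOURCE A (Python) =====
-- def release_name_len(sdist_release):
--     return len(sdist_release['filename'])
--
-- def find_favorite_archive(sdist_releases, f_types):
--     ok_releases = []
--     for sdist_rel in sdist_releases:
--         for t in f_types:
--             if sdist_rel['filename'].endswith(t):
--                 ok_releases.append(sdist_rel)
--     for t in f_types:
--         releases_with_type = [rel for rel in sdist_releases if rel['filename'].endswith(t)]
--         if releases_with_type:
--             return min(releases_with_type, key=release_name_len)
--     return None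
-- ===== SOURCE B (Python) =====
-- def find_favorite_archive(sdist_releases, f_types):
--     # One pass: for each filetype, remember the release with the strictly
--     # shortest filename seen so far (first minimum wins on ties).
--     best = {}
--     for rel in sdist_releases:
--         for t in f_types:
--             if rel['filename'].endswith(t):
--                 cur = best.get(t)
--                 if cur is None or len(rel['filename']) < len(cur['filename']):
--                     best[t] = rel
--     for t in f_types:
--         if t in best:
--             return best[t]
--     return None
-- ===== Notes on version B (the rewrite author's own statement) =====
-- stated objective: alternative
-- what changed: Single pass over sdist_releases building a dict from filetype to its shortest-named release (strict-inequality update keeps the first minimum), then one scan of f_types using dict lookup; this drops A's dead first loop and A's per-type rescan of sdist_releases (filter + min for every type).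
import Mathlib
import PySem

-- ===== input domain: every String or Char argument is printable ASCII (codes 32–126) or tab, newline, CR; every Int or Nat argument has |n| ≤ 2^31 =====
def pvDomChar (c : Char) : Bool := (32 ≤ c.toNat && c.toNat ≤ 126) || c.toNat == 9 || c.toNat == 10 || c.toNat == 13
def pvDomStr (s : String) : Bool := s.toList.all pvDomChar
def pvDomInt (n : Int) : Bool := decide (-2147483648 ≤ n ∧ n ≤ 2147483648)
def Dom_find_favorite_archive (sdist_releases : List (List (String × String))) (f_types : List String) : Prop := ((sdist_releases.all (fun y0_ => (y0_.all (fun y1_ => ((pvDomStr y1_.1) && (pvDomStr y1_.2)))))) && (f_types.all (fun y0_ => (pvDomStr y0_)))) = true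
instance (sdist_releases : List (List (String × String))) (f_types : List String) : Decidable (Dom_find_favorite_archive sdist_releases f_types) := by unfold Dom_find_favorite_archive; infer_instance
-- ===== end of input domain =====

-- B replaces A's per-type rescans (filter + min over all releases for each filetype) by one pass
-- building a dict from filetype to its shortest-named release, then a dict-lookup scan of f_types;
-- A's dead first loop is dropped. Equal return value on Pre_ (where the Python A does not raise).

-- rel['filename']: first-match association-list lookup; the `getD ""` default is never reached
-- under Pre_ (Python raises KeyError there). Shared by both ports (both Pythons write rel['filename']).
def pvFname (rel : List (String × String)) : String :=
  (rel.lookup "filename").getD ""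

-- rel['filename'].endswith(t)  (shared by both ports)
def pvMatch (rel : List (String × String)) (t : String) : Bool :=
  PySem.Str.endswith (pvFname rel) t

-- release_name_len(rel) = len(rel['filename'])  (shared by both ports)
def pvLen (rel : List (String × String)) : Int :=
  PySem.Str.len (pvFname rel)

-- ===== PORT A =====
-- A's second loop: for each filetype in order, rescan sdist_releases (filter), take min by name length.
def pvScanA (sdist_releases : List (List (String × String))) : List String → Option (List (String × String))
  | [] => none
  | t :: ts =>
    let releases_with_type := sdist_releases.filter (fun rel => pvMatch rel t)
    match PySem.List.min? releases_with_type pvLen with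
    | some m => some m
    | none => pvScanA sdist_releases ts

def find_favorite_archive (sdist_releases : List (List (String × String))) (f_types : List String) : Option (List (String × String)) :=
  -- A's first loop builds ok_releases, which A never uses
  let _ok_releases : List (List (String × String)) :=
    sdist_releases.foldl (fun acc sdist_rel =>
      f_types.foldl (fun acc t =>
        if pvMatch sdist_rel t then acc ++ [sdist_rel] else acc) acc) []
  pvScanA sdist_releases f_types

-- ===== PORT B =====
-- one table-update step of B: if rel's filename endswith t, keep the strictly shorter name (first min wins)
def pvUpd (d : PySem.Dict String (List (String × String))) (rel : List (String × String)) (t : String) :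
    PySem.Dict String (List (String × String)) :=
  if pvMatch rel t then
    match d.get? t with
    | none => d.insert t rel
    | some cur => if pvLen rel < pvLen cur then d.insert t rel else d
  else d

def pvBuild (sdist_releases : List (List (String × String))) (f_types : List String) :
    PySem.Dict String (List (String × String)) :=
  sdist_releases.foldl (fun d rel => f_types.foldl (fun d t => pvUpd d rel t) d) PySem.Dict.empty

-- B's final loop: first filetype present in the table wins
def pvScanB (d : PySem.Dict String (List (String × String))) : List String → Option (List (String × String))
  | [] => none
  | t :: ts =>
    match d.get? t with
    | some r => some r
    | none => pvScanB d ts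

def find_favorite_archive_alt (sdist_releases : List (List (String × String))) (f_types : List String) : Option (List (String × String)) :=
  pvScanB (pvBuild sdist_releases f_types) f_types

-- ===== PRECONDITION & SPEC =====
-- Pre_ excludes exactly the inputs where the Python A raises KeyError: some release lacks the
-- 'filename' key while f_types is nonempty (with f_types = [] the lookup is never evaluated).
def Pre_find_favorite_archive (sdist_releases : List (List (String × String))) (f_types : List String) : Prop :=
  f_types = [] ∨ ∀ rel ∈ sdist_releases, (rel.lookup "filename").isSome = true
instance (sdist_releases : List (List (String × String))) (f_types : List String) : Decidable (Pre_find_favorite_archive sdist_releases f_types) := by unfold Pre_find_favorite_archive; infer_instance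

def pvWitness_find_favorite_archive : (List (List (String × String))) × List String :=
  ([[("filename", "pkg-1.0.tar.gz")], [("filename", "pkg-1.0.zip")]], [".tar.gz", ".zip"])

def Spec_find_favorite_archive (sdist_releases : List (List (String × String))) (f_types : List String) (out : Option (List (String × String))) : Prop := out = find_favorite_archive_alt sdist_releases f_types
instance (sdist_releases : List (List (String × String))) (f_types : List String) (out : Option (List (String × String))) : Decidable (Spec_find_favorite_archive sdist_releases f_types out) := by unfold Spec_find_favorite_archive; infer_instance

-- ===== CLAIM (what is proved, stated in full; the proofs are below) =====
def Claim_equal_find_favorite_archive : Prop := ∀ (sdist_releases : List (List (String × String))) (f_types : List String), Dom_find_favorite_archive sdist_releases f_types → Pre_find_favorite_archive sdist_releases f_types → Spec_find_favorite_archive sdist_releases f_types (find_favorite_archive sdist_releases f_types)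

-- ===== LEMMAS AND PROOFS =====

-- the running-minimum step (= the step of PySem.List.min? with key pvLen)
def pvComb (o : Option (List (String × String))) (rel : List (String × String)) : Option (List (String × String)) :=
  match o with
  | none => some rel
  | some m => if pvLen rel < pvLen m then some rel else some m

theorem pvComb_idem (o : Option (List (String × String))) (rel : List (String × String)) :
    pvComb (pvComb o rel) rel = pvComb o rel := by
  cases o with
  | none => simp [pvComb]
  | some m =>
    by_cases h : pvLen rel < pvLen m <;> simp [pvComb, h]

-- one pvUpd step, seen at its own key
theorem pvUpd_get?_self (d : PySem.Dict String (List (String × String)))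
    (rel : List (String × String)) (t : String) :
    (pvUpd d rel t).get? t = if pvMatch rel t then pvComb (d.get? t) rel else d.get? t := by
  unfold pvUpd
  by_cases he : pvMatch rel t
  · cases hg : d.get? t with
    | none => simp [he, pvComb, PySem.Dict.get?_insert_self]
    | some cur =>
      by_cases hlt : pvLen rel < pvLen cur <;>
        simp [he, hg, hlt, pvComb, PySem.Dict.get?_insert_self]
  · simp [he]

-- one pvUpd step at a different key changes nothing there
theorem pvUpd_get?_ne (d : PySem.Dict String (List (String × String)))
    (rel : List (String × String)) (t t' : String) (hne : t ≠ t') :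
    (pvUpd d rel t').get? t = d.get? t := by
  unfold pvUpd
  by_cases he : pvMatch rel t'
  · cases hg : d.get? t' with
    | none => simp [he, PySem.Dict.get?_insert_of_ne _ _ hne]
    | some cur =>
      by_cases hlt : pvLen rel < pvLen cur <;>
        simp [he, hlt, PySem.Dict.get?_insert_of_ne _ _ hne]
  · simp [he]

-- effect of one release's inner loop (over the filetype list) on the table entry at t
theorem pvUpd_foldl_get? (rel : List (String × String)) (t : String) :
    ∀ (ts : List String) (d : PySem.Dict String (List (String × String))),
      (ts.foldl (fun d t' => pvUpd d rel t') d).get? t =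
        if t ∈ ts ∧ pvMatch rel t then pvComb (d.get? t) rel else d.get? t := by
  intro ts
  induction ts with
  | nil => intro d; simp
  | cons t' ts ih =>
    intro d
    by_cases hne : t = t'
    · subst hne
      simp only [List.foldl_cons, ih, pvUpd_get?_self]
      by_cases he : pvMatch rel t
      · by_cases hmem : t ∈ ts <;> simp [he, hmem, pvComb_idem]
      · simp [he]
    · simp only [List.foldl_cons, ih, pvUpd_get?_ne d rel t t' hne]
      have hiff : (t ∈ t' :: ts) ↔ (t ∈ ts) := by
        simp [List.mem_cons, hne]
      by_cases hc : t ∈ ts ∧ pvMatch rel t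
      · simp [hc, hiff.mpr hc.1]
      · simp [hc]
        intro hmem hmatch
        exact (hc ⟨hmem.resolve_left hne, hmatch⟩).elim

-- the table entry at t (for t ∈ f_types) is the running minimum over the releases matching t
theorem pvBuild_get? (f_types : List String) (t : String) (ht : t ∈ f_types) :
    ∀ (s : List (List (String × String))) (d : PySem.Dict String (List (String × String))),
      (s.foldl (fun d rel => f_types.foldl (fun d t' => pvUpd d rel t') d) d).get? t =
        (s.filter (fun rel => pvMatch rel t)).foldl pvComb (d.get? t) := by
  intro s
  induction s with
  | nil => intro d; simp
  | cons rel s ih =>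
    intro d
    simp only [List.foldl_cons, ih, pvUpd_foldl_get? rel t f_types d]
    by_cases he : pvMatch rel t
    · simp [he, ht]
    · simp [he]

-- PySem.List.min? with the name-length key IS the fold of pvComb from none
theorem min?_eq_foldl_pvComb (xs : List (List (String × String))) :
    PySem.List.min? xs pvLen = xs.foldl pvComb none := by
  simp only [PySem.List.min?]
  congr 1
  funext acc x
  cases acc <;> rfl

-- the two final scans agree once the table is characterised
theorem pvScan_eq (s : List (List (String × String))) (f_types : List String) :
    ∀ (ts : List String), (∀ t ∈ ts, t ∈ f_types) →
      pvScanA s ts = pvScanB (pvBuild s f_types) ts := by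
  intro ts
  induction ts with
  | nil => intro _; rfl
  | cons t ts ih =>
    intro hsub
    have ht : t ∈ f_types := hsub t (List.mem_cons_self ..)
    have hget : (pvBuild s f_types).get? t = PySem.List.min? (s.filter (fun rel => pvMatch rel t)) pvLen := by
      rw [min?_eq_foldl_pvComb]
      simpa [PySem.Dict.get?_empty] using pvBuild_get? f_types t ht s PySem.Dict.empty
    show (match PySem.List.min? (s.filter (fun rel => pvMatch rel t)) pvLen with
          | some m => some m
          | none => pvScanA s ts) =
         (match (pvBuild s f_types).get? t with
          | some r => some r
          | none => pvScanB (pvBuild s f_types) ts)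
    rw [hget]
    cases PySem.List.min? (s.filter (fun rel => pvMatch rel t)) pvLen with
    | none => exact ih (fun t' h => hsub t' (List.mem_cons_of_mem _ h))
    | some m => rfl

-- ===== VERDICT (by name: the statement is the Claim_ definition above) =====
theorem find_favorite_archive_spec : Claim_equal_find_favorite_archive := by
  intro s f _dom _pre
  unfold Spec_find_favorite_archive find_favorite_archive find_favorite_archive_alt
  exact pvScan_eq s f f (fun _ h => h)
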